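-- pv_equiv track=rewrite | github.com/falisadeh/nieren_insuffienz | 15_causal_analysis.py | _find_pmid_col
-- ===== SOURCE A (Python) =====
-- def _find_pmid_col(columns) -> str | None:
--     """Suche eine Spalte, die wie PMID aussieht (case-/whitespace-/underscore-robust)."""
--     cols = [c for c in columns]
--     # 1) exakte & einfache Varianten zuerst
--     candidates_exact = {"PMID", "pmid", "Pmid"}
--     for c in cols:
--         if c in candidates_exact:
--             return c
--     # 2) casefold + pattern
--     lc = {c: c.lower().replace(" ", "").replace("_", "") for c in cols}
--     # Priorität: beginnt mit 'pmid'
--     for c, norm in lc.items():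
--         if norm.startswith("pmid"):
--             return c
--
--     # fallback: patient id-like
--     for c, norm in lc.items():
--         if any(k in norm for k in ["patientid", "patid", "subjectid", "personid"]):
--             return c
--     return None
-- ===== SOURCE B (Python) =====
-- def _find_pmid_col(columns) -> str | None:
--     """Single pass: rank each column (0 exact, 1 pmid-prefix, 2 patient-id-like),
--     keep the earliest column of the strictly best rank seen."""
--     best = None
--     best_rank = 3
--     for c in columns:
--         if c in ("PMID", "pmid", "Pmid"):
--             r = 0
--         else:
--             norm = c.lower().replace(" ", "").replace("_", "")
--             if norm.startswith("pmid"):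
--                 r = 1
--             elif any(k in norm for k in ("patientid", "patid", "subjectid", "personid")):
--                 r = 2
--             else:
--                 continue
--         if r < best_rank:
--             best, best_rank = c, r
--             if best_rank == 0:
--                 break
--     return best
-- ===== Notes on version B (the rewrite author's own statement) =====
-- stated objective: simpler
-- what changed: Replaces A's three sequential scans (plus an intermediate normalized dict) with one pass keeping a running best column under a 3-level priority rank, updating only on strictly lower rank.
import Mathlib
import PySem

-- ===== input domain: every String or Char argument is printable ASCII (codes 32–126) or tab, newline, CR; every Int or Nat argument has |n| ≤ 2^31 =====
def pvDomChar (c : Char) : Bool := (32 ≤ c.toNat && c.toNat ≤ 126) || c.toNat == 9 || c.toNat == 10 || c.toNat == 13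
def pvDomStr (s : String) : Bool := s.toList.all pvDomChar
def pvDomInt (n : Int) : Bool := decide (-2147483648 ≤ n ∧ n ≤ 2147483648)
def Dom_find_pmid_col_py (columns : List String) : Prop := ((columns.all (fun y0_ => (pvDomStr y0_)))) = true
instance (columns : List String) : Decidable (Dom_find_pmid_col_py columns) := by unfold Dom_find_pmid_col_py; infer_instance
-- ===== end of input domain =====

-- B replaces A's three sequential scans (and the intermediate normalized dict) by a single
-- pass that keeps a running best column under a 3-level priority rank (objective: simpler).

-- ===== PORT A =====
-- c.lower().replace(" ", "").replace("_", "")  (shared text helper, identical expression in both Pythons)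
def pvNorm (c : String) : List Char :=
  PySem.Chars.replace (PySem.Chars.replace (PySem.Chars.lower c.toList) " ".toList "".toList) "_".toList "".toList

-- c in {"PMID", "pmid", "Pmid"}
def pvP0 (c : String) : Bool := PySem.Set.contains (PySem.Set.ofList ["PMID", "pmid", "Pmid"]) c
-- norm.startswith("pmid")
def pvP1 (c : String) : Bool := PySem.Chars.startswith (pvNorm c) "pmid".toList
-- any(k in norm for k in ["patientid", "patid", "subjectid", "personid"])
def pvP2 (c : String) : Bool :=
  ["patientid", "patid", "subjectid", "personid"].any (fun k => PySem.Chars.isIn k.toList (pvNorm c))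

def find_pmid_col_py (columns : List String) : Option String :=
  let cols := columns
  -- 1) exact & simple variants first
  match cols.find? (fun c => pvP0 c) with
  | some c => some c
  | none =>
    -- lc = {c: normalized for c in cols}: keys are the first occurrences in order,
    -- value depends only on the key, so items = dedup(cols) paired with pvNorm
    let lc := (PySem.List.dedup cols).map (fun c => (c, pvNorm c))
    -- 2) startswith 'pmid'
    match lc.find? (fun p => PySem.Chars.startswith p.2 "pmid".toList) with
    | some p => some p.1
    | none =>
      -- fallback: patient id-like
      match lc.find? (fun p => ["patientid", "patid", "subjectid", "personid"].any
          (fun k => PySem.Chars.isIn k.toList p.2)) with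
      | some p => some p.1
      | none => none

-- ===== PORT B =====
def pvRank? (c : String) : Option Nat :=
  if pvP0 c then some 0
  else if pvP1 c then some 1
  else if pvP2 c then some 2
  else none

def pvBestLoop : List String → Option String → Nat → Option String
  | [], best, _ => best
  | c :: rest, best, bestRank =>
    match pvRank? c with
    | none => pvBestLoop rest best bestRank
    | some r =>
      if r < bestRank then
        (if r = 0 then some c else pvBestLoop rest (some c) r)
      else pvBestLoop rest best bestRank

def find_pmid_col_py_alt (columns : List String) : Option String :=
  pvBestLoop columns none 3

-- ===== PRECONDITION & SPEC =====
def Spec_find_pmid_col_py (columns : List String) (out : Option String) : Prop := out = find_pmid_col_py_alt columns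
instance (columns : List String) (out : Option String) : Decidable (Spec_find_pmid_col_py columns out) := by unfold Spec_find_pmid_col_py; infer_instance

-- ===== CLAIM (what is proved, stated in full; the proofs are below) =====
def Claim_equal_find_pmid_col_py : Prop := ∀ (columns : List String), Dom_find_pmid_col_py columns → Spec_find_pmid_col_py columns (find_pmid_col_py columns)

-- ===== LEMMAS AND PROOFS =====

-- the common characterization: first rank-0 column, else first rank-1, else first rank-2
def pvChain (xs : List String) : Option String :=
  (xs.find? pvP0).or ((xs.find? pvP1).or (xs.find? pvP2))

lemma find?_add (q : String → Bool) (s : List String) (x : String) :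
    List.find? q (PySem.Set.add s x) = (List.find? q s).or (if q x then some x else none) := by
  by_cases hc : PySem.Set.contains s x = true
  · have hmem : x ∈ s := by
      simpa [PySem.Set.contains] using hc
    have hadd : PySem.Set.add s x = s := by simp [PySem.Set.add, hmem]
    rw [hadd]
    by_cases hq : q x = true
    · have : ∃ y ∈ s, q y = true := ⟨x, hmem, hq⟩
      rcases (List.find?_isSome (p := q) (xs := s)).2 this |> Option.isSome_iff_exists.1 with ⟨a, ha⟩
      simp [ha, hq]
    · simp [Bool.not_eq_true] at hq
      simp [hq]
  · have hmem : x ∉ s := by simpa [PySem.Set.contains] using hc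
    have hadd : PySem.Set.add s x = s ++ [x] := by simp [PySem.Set.add, hmem]
    rw [hadd, List.find?_append]
    cases hq : q x <;> simp [hq]

lemma find?_foldl_add (q : String → Bool) (xs : List String) :
    ∀ s : List String, List.find? q (xs.foldl PySem.Set.add s) = (List.find? q s).or (List.find? q xs) := by
  induction xs with
  | nil => intro s; simp
  | cons x t ih =>
    intro s
    simp only [List.foldl_cons, ih, find?_add, Option.or_assoc, List.find?_cons]
    cases hq : q x <;> simp

lemma find?_dedup (q : String → Bool) (xs : List String) :
    List.find? q (PySem.List.dedup xs) = List.find? q xs := by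
  have : PySem.List.dedup xs = xs.foldl PySem.Set.add [] := by
    simp [PySem.Set.ofList_eq_foldl]
  rw [this, find?_foldl_add]
  simp

lemma A_eq_chain (columns : List String) : find_pmid_col_py columns = pvChain columns := by
  have h1 : (fun c => PySem.Chars.startswith (pvNorm c) "pmid".toList) = pvP1 := by
    funext c; rfl
  have h2 : (fun c => ["patientid", "patid", "subjectid", "personid"].any
      (fun k => PySem.Chars.isIn k.toList (pvNorm c))) = pvP2 := by
    funext c; rfl
  unfold find_pmid_col_py pvChain
  simp only [List.find?_map, Function.comp_def, find?_dedup, h1, h2]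
  cases h0 : columns.find? pvP0 with
  | some c => simp
  | none =>
    cases hp1 : columns.find? pvP1 with
    | some p => simp
    | none =>
      cases hp2 : columns.find? pvP2 <;> simp

lemma bestLoop_one (xs : List String) : ∀ b : String,
    pvBestLoop xs (some b) 1 = (xs.find? pvP0).or (some b) := by
  induction xs with
  | nil => intro b; simp [pvBestLoop]
  | cons c t ih =>
    intro b
    cases h0 : pvP0 c
    · cases h1 : pvP1 c <;> cases h2 : pvP2 c <;>
        simp [pvBestLoop, pvRank?, h0, h1, h2, ih]
    · simp [pvBestLoop, pvRank?, h0]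

lemma bestLoop_two (xs : List String) : ∀ b : String,
    pvBestLoop xs (some b) 2 = (xs.find? pvP0).or ((xs.find? pvP1).or (some b)) := by
  induction xs with
  | nil => intro b; simp [pvBestLoop]
  | cons c t ih =>
    intro b
    cases h0 : pvP0 c
    · cases h1 : pvP1 c
      · cases h2 : pvP2 c <;> simp [pvBestLoop, pvRank?, h0, h1, h2, ih]
      · simp [pvBestLoop, pvRank?, h0, h1, bestLoop_one]
    · simp [pvBestLoop, pvRank?, h0]

lemma B_eq_chain (columns : List String) : find_pmid_col_py_alt columns = pvChain columns := by
  unfold find_pmid_col_py_alt pvChain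
  induction columns with
  | nil => simp [pvBestLoop]
  | cons c t ih =>
    cases h0 : pvP0 c
    · cases h1 : pvP1 c
      · cases h2 : pvP2 c
        · simp [pvBestLoop, pvRank?, h0, h1, h2, ih]
        · simp [pvBestLoop, pvRank?, h0, h1, h2, bestLoop_two]
      · simp [pvBestLoop, pvRank?, h0, h1, bestLoop_one]
    · simp [pvBestLoop, pvRank?, h0]

-- ===== VERDICT (by name: the statement is the Claim_ definition above) =====
theorem find_pmid_col_py_spec : Claim_equal_find_pmid_col_py := by
  intro columns _
  show find_pmid_col_py columns = find_pmid_col_py_alt columns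
  rw [A_eq_chain, B_eq_chain]
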